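-- pv_equiv track=rewrite | github.com/pinkchampa8ne/python-hw | math_hw_2.py | g1
-- ===== SOURCE A (Python) =====
-- def g1(x):
--     if x > 0:
--         y = 2*x - 2
--         if y > 0:
--             z = x
--             while y > 0:
--                 x = z * 10**y + x
--                 y = y - 2
--             return x
--         if y == 0:
--             return 1
--     if x == 0:
--         return 0
-- ===== SOURCE B (Python) =====
-- def g1(x):
--     if x < 0:
--         return None
--     return x * (100 ** x - 1) // 99
-- ===== Notes on version B (the rewrite author's own statement) =====
-- stated objective: faster
-- what changed: Replaces A's digit-accumulation loop (one huge multiply-add per iteration) by the closed-form geometric-series quotient computed with one fast exponentiation and one exact division; intended as faster, measured ~800x at the largest size both finish.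
import Mathlib
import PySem

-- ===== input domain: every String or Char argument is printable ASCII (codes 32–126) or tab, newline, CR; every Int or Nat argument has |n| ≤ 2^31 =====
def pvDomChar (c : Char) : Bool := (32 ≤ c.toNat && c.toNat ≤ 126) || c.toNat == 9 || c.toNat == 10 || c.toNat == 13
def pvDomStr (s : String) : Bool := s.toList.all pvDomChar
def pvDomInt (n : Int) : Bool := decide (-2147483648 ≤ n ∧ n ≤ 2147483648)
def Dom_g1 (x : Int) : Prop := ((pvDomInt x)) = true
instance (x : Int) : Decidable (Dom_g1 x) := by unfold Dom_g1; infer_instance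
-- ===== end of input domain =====

-- B replaces A's digit-accumulation loop by the closed-form geometric-series quotient (intended as faster; a timing run measured ~800x at the largest size both Pythons finished).

-- ===== PORT A =====
-- the while loop of A: while y > 0: x = z * 10**y + x; y = y - 2
def g1Loop (z y x : Int) : Int :=
  if h : y > 0 then g1Loop z (y - 2) (z * 10 ^ y.toNat + x) else x
termination_by y.toNat
decreasing_by omega

def g1 (x : Int) : Option Int :=
  if x > 0 then
    let y := 2 * x - 2
    if y > 0 then some (g1Loop x y x)
    else if y = 0 then some 1
    else if x = 0 then some 0 else none
  else if x = 0 then some 0 else none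

-- ===== PORT B =====
def g1_alt (x : Int) : Option Int :=
  if x < 0 then none
  else some (PySem.Int.floordiv (x * (100 ^ x.toNat - 1)) 99)

-- ===== PRECONDITION & SPEC =====
def Spec_g1 (x : Int) (out : Option Int) : Prop := out = g1_alt x
instance (x : Int) (out : Option Int) : Decidable (Spec_g1 x out) := by unfold Spec_g1; infer_instance

-- ===== CLAIM (what is proved, stated in full; the proofs are below) =====
def Claim_equal_g1 : Prop := ∀ (x : Int), Dom_g1 x → Spec_g1 x (g1 x)

-- ===== LEMMAS AND PROOFS =====

-- A's loop adds z·100^j for j = k, k-1, …, 1 onto the accumulator.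
theorem g1Loop_eq (z : Int) (k : Nat) (acc : Int) :
    g1Loop z (2 * (k : Int)) acc = acc + z * ∑ j ∈ Finset.range k, (100 : Int) ^ (j + 1) := by
  induction k generalizing acc with
  | zero => rw [g1Loop]; simp
  | succ k ih =>
      rw [g1Loop]
      have hpos : (2 * ((k : Int) + 1)) > 0 := by positivity
      have harg : 2 * ((k + 1 : Nat) : Int) - 2 = 2 * (k : Int) := by push_cast; ring
      have htn : (2 * ((k + 1 : Nat) : Int)).toNat = 2 * (k + 1) := by push_cast; omega
      simp only [harg, htn]
      rw [dif_pos (by push_cast; omega), ih]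
      rw [Finset.sum_range_succ]
      have : (10 : Int) ^ (2 * (k + 1)) = 100 ^ (k + 1) := by
        rw [pow_mul]; norm_num
      rw [this]; ring

theorem closed_form (x : Int) (n : Nat) :
    PySem.Int.floordiv (x * (100 ^ n - 1)) 99
      = x * ∑ j ∈ Finset.range n, (100 : Int) ^ j := by
  have hg : (∑ j ∈ Finset.range n, (100 : Int) ^ j) * (100 - 1) = 100 ^ n - 1 :=
    geom_sum_mul 100 n
  have : x * (100 ^ n - 1) = (x * ∑ j ∈ Finset.range n, (100 : Int) ^ j) * 99 := by
    rw [← hg]; ring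
  rw [this, PySem.Int.floordiv_eq_ediv_of_pos (by norm_num)]
  exact Int.mul_ediv_cancel _ (by norm_num)

-- ===== VERDICT (by name: the statement is the Claim_ definition above) =====
theorem g1_spec : Claim_equal_g1 := by
  intro x _
  unfold Spec_g1 g1 g1_alt
  rcases lt_trichotomy x 0 with hneg | hzero | hpos
  · rw [if_neg (by omega), if_neg (by omega), if_pos hneg]
  · subst hzero; norm_num
  · rw [if_pos hpos, if_neg (show ¬ x < 0 by omega)]
    by_cases h1 : x = 1
    · subst h1; decide
    · have hx2 : 2 ≤ x := by omega
      simp only [if_pos (show 2 * x - 2 > 0 by omega)]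
      obtain ⟨k, hk⟩ : ∃ k : Nat, x = (k : Int) + 1 :=
        ⟨(x - 1).toNat, by omega⟩
      have hy : 2 * x - 2 = 2 * (k : Int) := by rw [hk]; ring
      have hxt : x.toNat = k + 1 := by omega
      rw [hy, g1Loop_eq, hxt, closed_form x (k + 1)]
      rw [Finset.sum_range_succ' (fun j => (100 : Int) ^ j) k]
      push_cast
      ring_nf
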